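-- pv_equiv track=rewrite | github.com/fakabbir/sdk-examples | BundesGit/BundesGit.py | __md_to_text
-- ===== SOURCE A (Python) =====
-- def __md_to_text(mdtext):
--     '''Primitive markdown to LibreOffice text translation'''
--     # TODO: could use more sofistication, e.g. translate enumerations etc.
--     result = ''
--     newline = True
--     for line in mdtext.split('\n'):
--         if len(line):
--             if not newline:
--                 result = result + ' '
--             result = result + line
--             newline = False
--         else:
--             result = result + '\n'
--             newline = True
--     return result
-- ===== SOURCE B (Python) =====
-- def __md_to_text(mdtext):
--     '''Primitive markdown to LibreOffice text translation'''
--     lines = mdtext.split('\n')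
--     n = len(lines)
--     parts = []
--     i = 0
--     while i < n:
--         if lines[i]:
--             j = i
--             while j < n and lines[j]:
--                 j += 1
--             parts.append(' '.join(lines[i:j]))
--             i = j
--         else:
--             parts.append('\n')
--             i += 1
--     return ''.join(parts)
-- ===== Notes on version B (the rewrite author's own statement) =====
-- stated objective: alternative
-- what changed: Replaces the character-accumulating loop with a running boolean flag by explicit run-grouping: an index scan finds each maximal run of non-empty lines and joins it with a space separator, each empty line yields one newline character, and the collected parts are concatenated once at the end.
import Mathlib
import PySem

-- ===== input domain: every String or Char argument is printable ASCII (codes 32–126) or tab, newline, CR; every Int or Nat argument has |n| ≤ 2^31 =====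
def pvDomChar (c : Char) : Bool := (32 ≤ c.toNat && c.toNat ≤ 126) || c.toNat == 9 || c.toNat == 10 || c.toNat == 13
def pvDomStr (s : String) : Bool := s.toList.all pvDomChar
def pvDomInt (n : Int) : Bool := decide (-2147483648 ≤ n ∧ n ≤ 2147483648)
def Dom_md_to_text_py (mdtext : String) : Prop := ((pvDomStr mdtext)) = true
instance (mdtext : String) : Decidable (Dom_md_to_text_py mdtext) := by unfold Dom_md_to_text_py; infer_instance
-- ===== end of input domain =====

-- B replaces A's running 'newline' flag with explicit grouping of maximal runs of
-- non-empty lines (alternative decomposition, same cost); return values proved equal.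

-- ===== PORT A =====
-- one step of A's for-loop: state = (result so far, newline flag)
def mdStepA (st : List Char × Bool) (line : List Char) : List Char × Bool :=
  if line.length ≠ 0 then
    ((if !st.2 then st.1 ++ [' '] else st.1) ++ line, false)
  else
    (st.1 ++ ['\n'], true)

def md_to_text_py (mdtext : String) : String :=
  String.ofList (((PySem.Chars.splitOn mdtext.toList ['\n']).foldl mdStepA ([], true)).1)

-- ===== PORT B =====
-- B's outer while loop over the line list: each maximal run of non-empty lines is
-- joined with ' '; each empty line contributes one '\n'.
def mdGroupsB : List (List Char) → List Char
  | [] => []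
  | l :: ls =>
    if l.isEmpty then
      '\n' :: mdGroupsB ls
    else
      PySem.Chars.join [' '] (l :: ls.takeWhile (fun x => !x.isEmpty)) ++
        mdGroupsB (ls.dropWhile (fun x => !x.isEmpty))
  termination_by ls => ls.length
  decreasing_by
    · simp
    · simp only [List.length_cons]
      exact Nat.lt_succ_of_le (ls.dropWhile_sublist _).length_le

def md_to_text_py_alt (mdtext : String) : String :=
  String.ofList (mdGroupsB (PySem.Chars.splitOn mdtext.toList ['\n']))

-- ===== PRECONDITION & SPEC =====
def Spec_md_to_text_py (mdtext : String) (out : String) : Prop := out = md_to_text_py_alt mdtext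
instance (mdtext : String) (out : String) : Decidable (Spec_md_to_text_py mdtext out) := by unfold Spec_md_to_text_py; infer_instance

-- ===== CLAIM (what is proved, stated in full; the proofs are below) =====
def Claim_equal_md_to_text_py : Prop := ∀ (mdtext : String), Dom_md_to_text_py mdtext → Spec_md_to_text_py mdtext (md_to_text_py mdtext)

-- ===== LEMMAS AND PROOFS =====

-- folding A's step over a run of non-empty lines with flag false appends " " ++ line for each
lemma foldl_run (run : List (List Char)) (h : ∀ x ∈ run, x.length ≠ 0) (r : List Char) :
    run.foldl mdStepA (r, false) = (r ++ run.flatMap (fun x => ' ' :: x), false) := by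
  induction run generalizing r with
  | nil => simp
  | cons l ls ih =>
    have hl : l.length ≠ 0 := h l (List.mem_cons_self ..)
    simp only [List.foldl_cons, mdStepA, if_pos hl, Bool.not_false]
    rw [ih (fun x hx => h x (List.mem_cons_of_mem _ hx))]
    simp

-- join with a single space equals head ++ flatMap (' ' :: ·) over the tail
lemma join_space (l : List Char) (ls : List (List Char)) :
    PySem.Chars.join [' '] (l :: ls) = l ++ ls.flatMap (fun x => ' ' :: x) := by
  induction ls generalizing l with
  | nil => simp [PySem.Chars.join_singleton]
  | cons m ms ih =>
    rw [PySem.Chars.join_cons_cons, ih]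
    simp

-- main invariant: A's fold started with newline = true produces r ++ B's grouping
lemma foldl_eq_groups (lines : List (List Char)) (r : List Char) :
    (lines.foldl mdStepA (r, true)).1 = r ++ mdGroupsB lines := by
  induction hn : lines.length using Nat.strong_induction_on generalizing lines r with
  | _ n ih =>
    match lines with
    | [] => simp [mdGroupsB]
    | l :: ls =>
      simp only [List.length_cons] at hn
      by_cases hl : l.isEmpty
      · have hl0 : l.length = 0 := by simpa [List.isEmpty_iff_length_eq_zero] using hl
        rw [mdGroupsB]
        simp only [if_pos hl, List.foldl_cons, mdStepA, hl0]
        simp only [ne_eq, not_true_eq_false, if_false]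
        rw [ih ls.length (by omega) ls _ rfl]
        simp
      · have hl0 : l.length ≠ 0 := by
          simpa [List.isEmpty_iff_length_eq_zero] using hl
        rw [mdGroupsB]
        simp only [if_neg hl]
        have hsplit : ls = ls.takeWhile (fun x => !x.isEmpty) ++ ls.dropWhile (fun x => !x.isEmpty) :=
          (List.takeWhile_append_dropWhile).symm
        set run := ls.takeWhile (fun x => !x.isEmpty) with hrun
        set rest := ls.dropWhile (fun x => !x.isEmpty) with hrest
        have hrunne : ∀ x ∈ run, x.length ≠ 0 := by
          intro x hx
          have := List.mem_takeWhile_imp hx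
          simpa [List.isEmpty_iff_length_eq_zero] using this
        have hfirst : mdStepA (r, true) l = (r ++ l, false) := by
          simp [mdStepA, hl0]
        rw [List.foldl_cons, hfirst]
        conv_lhs => rw [hsplit]
        rw [List.foldl_append, foldl_run run hrunne (r ++ l)]
        cases hres : rest with
        | nil => simp [mdGroupsB, join_space]
        | cons m ms =>
          have hm : m.isEmpty := by
            have : ¬ (fun x => !x.isEmpty) m = true := by
              have := List.head?_dropWhile_not (p := fun x => !x.isEmpty) (l := ls)
              rw [← hrest, hres] at this
              simpa using this
            simpa using this
          have hm0 : m.length = 0 := by simpa [List.isEmpty_iff_length_eq_zero] using hm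
          have hlen : ms.length < n := by
            have h1 : rest.length ≤ ls.length := (ls.dropWhile_sublist _).length_le
            rw [hres] at h1
            simp only [List.length_cons] at h1
            omega
          rw [List.foldl_cons]
          have hstep : mdStepA (r ++ l ++ run.flatMap (fun x => ' ' :: x), false) m
              = (r ++ l ++ run.flatMap (fun x => ' ' :: x) ++ ['\n'], true) := by
            simp [mdStepA, hm0]
          rw [hstep, ih ms.length hlen ms _ rfl]
          rw [mdGroupsB]
          simp only [if_pos hm]
          simp [join_space]

-- ===== VERDICT (by name: the statement is the Claim_ definition above) =====
theorem md_to_text_py_spec : Claim_equal_md_to_text_py := by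
  intro mdtext _
  unfold Spec_md_to_text_py md_to_text_py md_to_text_py_alt
  rw [foldl_eq_groups]
  simp
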